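-- pv_equiv track=rewrite | github.com/MiroXoxo/GOA-Hw | HwProjects/Day 22/hw19.2.py | maxLenString
-- ===== SOURCE A (Python) =====
-- def maxLenString(list):
--     lengthListStrings=[]
--     sortedList=[]
--     maxStrings=""
--     for i in list:
--         lengthListStrings.append(len(i))
--     sortedList=sorted(lengthListStrings)
--     for i in range(len(list)):
--           if sortedList[-1]==len(list[i]):
--                maxStrings+=(list[i])+" "
--     return maxStrings
-- ===== SOURCE B (Python) =====
-- def maxLenString(list):
--     best = 0
--     acc = ""
--     for s in list:
--         if len(s) > best:
--             best = len(s)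
--             acc = s + " "
--         elif len(s) == best:
--             acc += s + " "
--     return acc
-- ===== Notes on version B (the rewrite author's own statement) =====
-- stated objective: alternative
-- what changed: Replaced A's three phases (build a list of all lengths, sort it, then re-scan the list by index comparing against sortedList[-1]) by a single pass that keeps a running maximum length and the accumulated string, resetting the accumulator when a strictly longer string appears.
import Mathlib
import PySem

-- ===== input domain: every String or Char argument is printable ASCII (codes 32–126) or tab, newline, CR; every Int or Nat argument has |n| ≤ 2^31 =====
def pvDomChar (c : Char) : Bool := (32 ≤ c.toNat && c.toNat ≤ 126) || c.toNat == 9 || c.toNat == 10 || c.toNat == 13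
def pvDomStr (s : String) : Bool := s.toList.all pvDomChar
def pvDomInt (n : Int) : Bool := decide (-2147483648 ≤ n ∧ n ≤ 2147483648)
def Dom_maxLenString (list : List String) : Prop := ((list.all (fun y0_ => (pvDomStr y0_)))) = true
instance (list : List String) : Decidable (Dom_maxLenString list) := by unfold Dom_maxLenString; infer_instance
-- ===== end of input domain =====

-- B replaces A's build-lengths / sort / indexed re-scan by one pass with a running max (alternative decomposition, same result).

-- ===== PORT A =====
-- `sortedList[-1]` is only evaluated when the loop body runs, i.e. when `list` (hence
-- `sortedList`) is nonempty; there pyGetD with a default is exact (index -1 is in range),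
-- and likewise `list[i]` with i taken from range(len(list)).
def maxLenString (list : List String) : String :=
  let lengthListStrings : List Int := list.foldl (fun acc i => acc ++ [PySem.Str.len i]) []
  let sortedList : List Int := PySem.List.sorted lengthListStrings (fun x => x) false
  (PySem.List.pyRange 0 (list.length : Int) 1).foldl
    (fun maxStrings i =>
      if PySem.List.pyGetD sortedList (-1) 0 = PySem.Str.len (PySem.List.pyGetD list i "")
      then maxStrings ++ (PySem.List.pyGetD list i "" ++ " ")
      else maxStrings) ""

-- ===== PORT B =====
def maxLenString_alt (list : List String) : String :=
  (list.foldl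
    (fun (st : Int × String) s =>
      if st.1 < PySem.Str.len s then (PySem.Str.len s, s ++ " ")
      else if PySem.Str.len s = st.1 then (st.1, st.2 ++ (s ++ " "))
      else st)
    ((0 : Int), "")).2

-- ===== PRECONDITION & SPEC =====
def Spec_maxLenString (list : List String) (out : String) : Prop := out = maxLenString_alt list
instance (list : List String) (out : String) : Decidable (Spec_maxLenString list out) := by unfold Spec_maxLenString; infer_instance

-- ===== CLAIM (what is proved, stated in full; the proofs are below) =====
def Claim_equal_maxLenString : Prop := ∀ (list : List String), Dom_maxLenString list → Spec_maxLenString list (maxLenString list)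

-- ===== LEMMAS AND PROOFS =====

/-- running maximum of the string lengths, starting at 0 (B's `best`). -/
def pvMaxLen (xs : List String) : Int := xs.foldl (fun m s => max m (PySem.Str.len s)) 0

/-- concatenation `s₁ ++ " " ++ s₂ ++ " " ++ …` of a list of strings. -/
def pvCat (l : List String) : String := l.foldl (fun a s => a ++ (s ++ " ")) ""

theorem pvCat_acc (xs : List String) (acc : String) :
    xs.foldl (fun a s => a ++ (s ++ " ")) acc = acc ++ pvCat xs := by
  induction xs generalizing acc with
  | nil => simp [pvCat]
  | cons x xs ih =>
      simp only [pvCat, List.foldl_cons]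
      rw [ih (acc ++ (x ++ " ")), ih ("" ++ (x ++ " "))]
      rw [String.empty_append, String.append_assoc]

theorem pvCat_append_singleton (l : List String) (x : String) :
    pvCat (l ++ [x]) = pvCat l ++ (x ++ " ") := by
  simp [pvCat, List.foldl_append]

theorem pvMaxLen_append_singleton (l : List String) (x : String) :
    pvMaxLen (l ++ [x]) = max (pvMaxLen l) (PySem.Str.len x) := by
  simp [pvMaxLen, List.foldl_append]

theorem pvMaxLen_bound (xs : List String) : ∀ s ∈ xs, PySem.Str.len s ≤ pvMaxLen xs :=
  (PySem.List.le_foldl_max_int xs PySem.Str.len 0).2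

/-- B's fold computes the running max together with the concatenation of the current maximal strings. -/
theorem pvB_invariant (xs : List String) :
    xs.foldl
      (fun (st : Int × String) s =>
        if st.1 < PySem.Str.len s then (PySem.Str.len s, s ++ " ")
        else if PySem.Str.len s = st.1 then (st.1, st.2 ++ (s ++ " "))
        else st)
      ((0 : Int), "")
    = (pvMaxLen xs, pvCat (xs.filter (fun s => decide (pvMaxLen xs = PySem.Str.len s)))) := by
  induction xs using List.reverseRecOn with
  | nil => simp [pvMaxLen, pvCat]
  | append_singleton l x ih =>
      rw [List.foldl_append, ih]
      rw [List.filter_append, pvMaxLen_append_singleton]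
      simp only [List.foldl_cons, List.foldl_nil]
      rcases lt_trichotomy (pvMaxLen l) (PySem.Str.len x) with h | h | h
      · -- new strict maximum: reset
        have hmax : max (pvMaxLen l) (PySem.Str.len x) = PySem.Str.len x := max_eq_right h.le
        have hfilt : l.filter (fun s => decide (max (pvMaxLen l) (PySem.Str.len x) = PySem.Str.len s)) = [] := by
          rw [List.filter_eq_nil_iff]
          intro s hs
          have := pvMaxLen_bound l s hs
          simp only [decide_eq_true_eq, hmax]
          omega
        have hc : decide (max (pvMaxLen l) (PySem.Str.len x) = PySem.Str.len x) = true := by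
          simp only [decide_eq_true_eq]; omega
        rw [if_pos h, hfilt, List.filter_singleton, hc, cond_true, List.nil_append, hmax]
        have hx1 : pvCat [x] = x ++ " " := by
          simp only [pvCat, List.foldl_cons, List.foldl_nil, String.empty_append]
        rw [hx1]
      · -- equal: append to the accumulator
        have hmax : max (pvMaxLen l) (PySem.Str.len x) = pvMaxLen l := by omega
        have hfilt : l.filter (fun s => decide (max (pvMaxLen l) (PySem.Str.len x) = PySem.Str.len s))
            = l.filter (fun s => decide (pvMaxLen l = PySem.Str.len s)) := by
          rw [hmax]
        have hc : decide (max (pvMaxLen l) (PySem.Str.len x) = PySem.Str.len x) = true := by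
          simp only [decide_eq_true_eq]; omega
        rw [if_neg (by omega), if_pos h.symm, hfilt, List.filter_singleton, hc, cond_true,
          hmax, pvCat_append_singleton]
      · -- shorter: state unchanged, and the new element is filtered out
        have hmax : max (pvMaxLen l) (PySem.Str.len x) = pvMaxLen l := max_eq_left h.le
        have hfilt : l.filter (fun s => decide (max (pvMaxLen l) (PySem.Str.len x) = PySem.Str.len s))
            = l.filter (fun s => decide (pvMaxLen l = PySem.Str.len s)) := by
          rw [hmax]
        have hc : decide (max (pvMaxLen l) (PySem.Str.len x) = PySem.Str.len x) = false := by
          simp only [decide_eq_false_iff_not]; omega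
        rw [if_neg (by omega), if_neg (by omega), hfilt, List.filter_singleton, hc, cond_false,
          List.append_nil, hmax]

/-- A's test threshold `sortedList[-1]` equals the running max, for nonempty input. -/
theorem pvLast_sorted_eq_max (xs : List String) (h : xs ≠ []) :
    PySem.List.pyGetD (PySem.List.sorted (xs.map PySem.Str.len) (fun x => x) false) (-1) 0
      = pvMaxLen xs := by
  set l := PySem.List.sorted (xs.map PySem.Str.len) (fun x => x) false with hl
  have hperm : l.Perm (xs.map PySem.Str.len) := PySem.List.sorted_perm _ _ _
  have hlne : l ≠ [] := by
    intro hnil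
    have hlen := hperm.length_eq
    rw [hnil] at hlen
    simp only [List.length_nil, List.length_map] at hlen
    exact h (List.eq_nil_of_length_eq_zero hlen.symm)
  rw [PySem.List.pyGetD_neg_one l 0 hlne]
  have hpw : l.Pairwise (fun a b => (a : Int) ≤ b) := by
    simpa using PySem.List.sorted_pairwise (xs := xs.map PySem.Str.len) (key := fun x => x)
  have hub : ∀ y ∈ l, y ≤ l.getLast hlne := by
    have hsplit : l.dropLast ++ [l.getLast hlne] = l := List.dropLast_append_getLast hlne
    intro y hy
    rw [← hsplit] at hpw hy
    rcases List.mem_append.mp hy with hy' | hy'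
    · exact (List.pairwise_append.mp hpw).2.2 y hy' _ (List.mem_singleton_self _)
    · simp only [List.mem_singleton] at hy'; omega
  have hlastmem : l.getLast hlne ∈ xs.map PySem.Str.len := hperm.mem_iff.mp (List.getLast_mem hlne)
  have h1 : l.getLast hlne ≤ pvMaxLen xs := by
    rcases List.mem_map.mp hlastmem with ⟨s, hs, hse⟩
    rw [← hse]
    exact pvMaxLen_bound xs s hs
  have hfm : pvMaxLen xs = (xs.map PySem.Str.len).foldl max 0 := by
    simp [pvMaxLen, List.foldl_map]
  have h2 : pvMaxLen xs ≤ l.getLast hlne := by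
    rcases PySem.List.foldl_max_mem (xs.map PySem.Str.len) 0 with hmem | hmem
    · -- running max stayed at its start 0; the last element is a length, hence ≥ 0
      rw [hfm, hmem]
      rcases List.mem_map.mp hlastmem with ⟨s, _, hse⟩
      rw [← hse]
      simp [PySem.Str.len_eq]
    · rw [hfm]
      exact hub _ (hperm.mem_iff.mpr hmem)
  omega

/-- A's second loop, rewritten as fold-over-the-list then filter. -/
theorem pvA_loop (xs : List String) (t : Int) :
    (PySem.List.pyRange 0 (xs.length : Int) 1).foldl
      (fun acc i =>
        if t = PySem.Str.len (PySem.List.pyGetD xs i "")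
        then acc ++ (PySem.List.pyGetD xs i "" ++ " ")
        else acc) ""
    = pvCat (xs.filter (fun s => decide (t = PySem.Str.len s))) := by
  rw [PySem.List.foldl_pyRange_zero_pyGetD' xs ""
      (fun acc s => if t = PySem.Str.len s then acc ++ (s ++ " ") else acc) ""]
  rw [PySem.List.foldl_ite_eq_foldl_filter]
  rw [pvCat_acc]
  exact String.empty_append

-- ===== VERDICT (by name: the statement is the Claim_ definition above) =====
theorem maxLenString_spec : Claim_equal_maxLenString := by
  intro list _
  unfold Spec_maxLenString maxLenString maxLenString_alt
  rw [pvB_invariant]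
  by_cases h : list = []
  · subst h
    simp [pvCat]
  · simp only [PySem.List.foldl_append_singleton_eq_map, List.nil_append]
    rw [pvLast_sorted_eq_max list h]
    exact pvA_loop list (pvMaxLen list)
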